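-- pv_equiv track=rewrite | github.com/malanjary-wur/NRPS_XUCextractor | XUCextract.py | mapCdomcoords
-- ===== SOURCE A (Python) =====
-- def mapCdomcoords(refalgn,qalign,featlocs):
--     #Translates reference locations of features based on ref and query alignment
--     #Featlocs: Reference locations dictionary of features relative to reference ex: {"alphahelix5":(153,165),...}
--     #Get list of coordinates needing to be translated
--     reflocs = [v[0] for k,v in featlocs.items() if not k.startswith("_")] + [v[1] for k,v in featlocs.items() if not k.startswith("_")]
--     #Get new alignment coords for each reference coord
--     j = 0 #index of ungapped position (reference position)
--     newlocs = {k:None for k in reflocs} #Dictionary to translate align location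
--     for i,x in enumerate(refalgn):
--         if x != "-": #increment ungapped position
--             j += 1
--         if j in reflocs: #Record alignment position in newlocs
--             newlocs[j] = i+1
--     #Translate the alignment locations to query locations
--     L = lambda seq,i : len(seq[:i])-seq[:i].count("-")
--     translocs = {k:L(qalign,v) for k,v in newlocs.items()}
--     #Make new feature location dictionary
--     newfeatlocs = {}
--     for k,v in featlocs.items():
--         if k.startswith("_"):
--             continue
--         newfeatlocs[k] = (translocs[v[0]],translocs[v[1]])
--     return newfeatlocs
-- ===== SOURCE B (Python) =====
-- def mapCdomcoords(refalgn, qalign, featlocs):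
--     # One pass over refalgn records, for every running non-gap count j, the LAST
--     # 1-based alignment position where the count equals j; a prefix-sum array over
--     # qalign then translates any alignment position in O(1).
--     last = {}
--     j = 0
--     for i, x in enumerate(refalgn):
--         if x != "-":
--             j += 1
--         last[j] = i + 1
--     pref = [0]
--     for ch in qalign:
--         pref.append(pref[-1] + (ch != "-"))
--     total = pref[-1]
--     m = len(qalign)
--     def trans(c):
--         p = last.get(c)
--         if p is None:
--             return total  # coordinate never reached: qalign[:None] is the whole string
--         return pref[min(p, m)]
--     return {k: (trans(v[0]), trans(v[1])) for k, v in featlocs.items() if not k.startswith("_")}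
-- ===== Notes on version B (the rewrite author's own statement) =====
-- stated objective: faster
-- what changed: A scans the whole reflocs list at every alignment position and re-slices qalign for every coordinate; B records in one pass the last alignment position for every running non-gap count and answers each translation in O(1) from a prefix non-gap-count array.
import Mathlib
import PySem

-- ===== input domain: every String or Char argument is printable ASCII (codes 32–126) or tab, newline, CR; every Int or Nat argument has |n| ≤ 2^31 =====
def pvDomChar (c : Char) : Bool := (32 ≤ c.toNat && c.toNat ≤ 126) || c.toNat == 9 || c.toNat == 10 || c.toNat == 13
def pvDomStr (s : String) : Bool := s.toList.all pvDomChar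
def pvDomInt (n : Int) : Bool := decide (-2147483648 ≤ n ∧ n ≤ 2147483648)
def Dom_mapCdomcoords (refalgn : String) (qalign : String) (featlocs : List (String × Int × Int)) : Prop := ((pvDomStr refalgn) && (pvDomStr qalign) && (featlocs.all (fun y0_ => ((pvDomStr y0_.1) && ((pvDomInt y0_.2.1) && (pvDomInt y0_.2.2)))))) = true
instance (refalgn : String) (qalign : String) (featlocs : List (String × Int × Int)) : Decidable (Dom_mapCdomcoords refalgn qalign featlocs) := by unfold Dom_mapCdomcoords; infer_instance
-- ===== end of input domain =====

-- B replaces A's per-position list-membership scan and per-coordinate slicing by one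
-- recording pass over refalgn plus a prefix non-gap-count array over qalign (objective:
-- faster). Equivalence of the RETURN value is proved for all inputs.

-- ===== PORT A =====
-- the loop body of A's 'for i,x in enumerate(refalgn)' (j updated, then conditionally recorded)
def pvStepA (reflocs : List Int) (st : Int × PySem.Dict Int (Option Int)) (ix : Int × Char) : Int × PySem.Dict Int (Option Int) :=
  let j := if ix.2 ≠ '-' then st.1 + 1 else st.1
  (j, if reflocs.contains j then st.2.insert j (some (ix.1 + 1)) else st.2)

-- A's lambda L: len(seq[:i]) - seq[:i].count("-")  (i = None slices the whole string)
def pvL (seq : List Char) (i : Option Int) : Int :=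
  let p := match i with
    | none => seq
    | some v => PySem.List.slice seq none (some v)
  (p.length : Int) - (p.count '-' : Int)

def mapCdomcoords (refalgn : String) (qalign : String) (featlocs : List (String × Int × Int)) : List (String × Int × Int) :=
  let fd := (PySem.Dict.ofList featlocs).items
  let reflocs : List Int :=
    (fd.filter (fun kv => !(PySem.Str.startswith kv.1 "_"))).map (fun kv => kv.2.1) ++
    (fd.filter (fun kv => !(PySem.Str.startswith kv.1 "_"))).map (fun kv => kv.2.2)
  let newlocs0 := PySem.Dict.ofList (reflocs.map (fun k => (k, (none : Option Int))))
  let newlocs := ((PySem.List.enumerate refalgn.toList 0).foldl (pvStepA reflocs) (0, newlocs0)).2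
  let translocs := newlocs.items.foldl
    (fun (d : PySem.Dict Int Int) kv => d.insert kv.1 (pvL qalign.toList kv.2)) PySem.Dict.empty
  -- translocs[v[0]] / translocs[v[1]]: the key is always present (it is in reflocs), so getD's default is never used
  let out := fd.foldl
    (fun (acc : PySem.Dict String (Int × Int)) kv =>
      if PySem.Str.startswith kv.1 "_" then acc
      else acc.insert kv.1 (translocs.getD kv.2.1 0, translocs.getD kv.2.2 0)) PySem.Dict.empty
  out.items

-- ===== PORT B =====
-- the loop body of B's recording pass: last[j] = i+1 for every running non-gap count j
def pvStepB (st : Int × PySem.Dict Int Int) (ix : Int × Char) : Int × PySem.Dict Int Int :=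
  let j := if ix.2 ≠ '-' then st.1 + 1 else st.1
  (j, st.2.insert j (ix.1 + 1))

-- the loop body of B's prefix pass: pref.append(pref[-1] + (ch != "-"))
def pvPrefStep (ps : List Int) (ch : Char) : List Int :=
  ps ++ [PySem.List.pyGetD ps (-1) 0 + (if ch ≠ '-' then 1 else 0)]

-- B's local function trans
def pvTransB (last : PySem.Dict Int Int) (pref : List Int) (total m c : Int) : Int :=
  match last.get? c with
  | none => total
  | some p => PySem.List.pyGetD pref (min p m) 0

def mapCdomcoords_alt (refalgn : String) (qalign : String) (featlocs : List (String × Int × Int)) : List (String × Int × Int) :=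
  let last := ((PySem.List.enumerate refalgn.toList 0).foldl pvStepB (0, PySem.Dict.empty)).2
  let pref := qalign.toList.foldl pvPrefStep [(0 : Int)]
  let total := PySem.List.pyGetD pref (-1) 0
  let m : Int := (qalign.toList.length : Int)
  ((PySem.Dict.ofList featlocs).items.filter (fun kv => !(PySem.Str.startswith kv.1 "_"))).map
    (fun kv => (kv.1, pvTransB last pref total m kv.2.1, pvTransB last pref total m kv.2.2))

-- ===== PRECONDITION & SPEC =====
def Spec_mapCdomcoords (refalgn : String) (qalign : String) (featlocs : List (String × Int × Int)) (out : List (String × Int × Int)) : Prop := out = mapCdomcoords_alt refalgn qalign featlocs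
instance (refalgn : String) (qalign : String) (featlocs : List (String × Int × Int)) (out : List (String × Int × Int)) : Decidable (Spec_mapCdomcoords refalgn qalign featlocs out) := by unfold Spec_mapCdomcoords; infer_instance

-- ===== CLAIM (what is proved, stated in full; the proofs are below) =====
def Claim_equal_mapCdomcoords : Prop := ∀ (refalgn : String) (qalign : String) (featlocs : List (String × Int × Int)), Dom_mapCdomcoords refalgn qalign featlocs → Spec_mapCdomcoords refalgn qalign featlocs (mapCdomcoords refalgn qalign featlocs)

-- ===== LEMMAS AND PROOFS =====

-- non-gap count of a character list
def pvNgc (l : List Char) : Int := (l.length : Int) - (l.count '-' : Int)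


theorem pvPref_eq (qs : List Char) :
    qs.foldl pvPrefStep [(0 : Int)] = (List.range (qs.length + 1)).map (fun n => pvNgc (qs.take n)) := by
  induction qs using List.reverseRecOn with
  | nil => simp [pvNgc, List.range_succ]
  | append_singleton qs c ih =>
    rw [List.foldl_append, ih]
    have hne : (List.range (qs.length + 1)).map (fun n => pvNgc (qs.take n)) ≠ [] := by simp
    show (List.range (qs.length + 1)).map (fun n => pvNgc (qs.take n)) ++ _ = _
    rw [PySem.List.pyGetD_neg_one _ _ hne]
    have hlast : ((List.range (qs.length + 1)).map (fun n => pvNgc (qs.take n))).getLast hne = pvNgc qs := by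
      simp [List.getLast_eq_getElem, List.getElem_map, List.getElem_range]
    rw [hlast]
    have hlen : (qs ++ [c]).length + 1 = (qs.length + 1) + 1 := by simp
    rw [hlen]
    conv_rhs => rw [List.range_succ, List.map_append]
    congr 1
    · apply List.map_congr_left
      intro n hn
      simp only [List.mem_range] at hn
      rw [List.take_append_of_le_length (by omega)]
    · simp only [List.map_cons, List.map_nil]
      congr 1
      rw [List.take_of_length_le (by simp)]
      simp only [pvNgc, List.count_append, List.length_append]
      by_cases hc : c = '-' <;> simp [hc] <;> push_cast <;> ring

theorem pvPref_getD_nat (qs : List Char) (n : Nat) (hn : n ≤ qs.length) :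
    PySem.List.pyGetD (qs.foldl pvPrefStep [(0 : Int)]) (n : Int) 0 = pvNgc (qs.take n) := by
  rw [pvPref_eq, PySem.List.pyGetD_natCast, List.getD_eq_getElem?_getD,
      List.getElem?_map, List.getElem?_range (by omega)]
  rfl

theorem pvPref_last (qs : List Char) :
    PySem.List.pyGetD (qs.foldl pvPrefStep [(0 : Int)]) (-1) 0 = pvNgc qs := by
  rw [pvPref_eq]
  have hne : (List.range (qs.length + 1)).map (fun n => pvNgc (qs.take n)) ≠ [] := by simp
  rw [PySem.List.pyGetD_neg_one _ _ hne]
  simp [List.getLast_eq_getElem, List.getElem_map, List.getElem_range]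

theorem pvL_none (qs : List Char) : pvL qs none = pvNgc qs := rfl

theorem pvL_some (qs : List Char) (p : Int) (hp : 0 ≤ p) :
    pvL qs (some p) = PySem.List.pyGetD (qs.foldl pvPrefStep [(0 : Int)]) (min p (qs.length : Int)) 0 := by
  have hmin : (0:Int) ≤ min p (qs.length : Int) := le_min hp (by positivity)
  have h1 : min p (qs.length : Int) = ((min p (qs.length : Int)).toNat : Int) := by omega
  rw [h1, pvPref_getD_nat qs _ (by omega)]
  rw [pvL]
  simp only [PySem.List.slice_to qs hp]
  have : qs.take p.toNat = qs.take (min p (qs.length:Int)).toNat := by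
    by_cases hle : p ≤ (qs.length : Int)
    · congr 1; omega
    · rw [List.take_of_length_le (by omega), List.take_of_length_le (by omega)]
  rw [this]; rfl

theorem pvFold_insert_const (l : List Int) (d : PySem.Dict Int (Option Int)) (c : Int) :
    ((l.map (fun k => (k, (none : Option Int)))).foldl (fun acc p => acc.insert p.1 p.2) d).get? c
      = if c ∈ l then some none else d.get? c := by
  induction l generalizing d with
  | nil => simp
  | cons k rest ih =>
    simp only [List.map_cons, List.foldl_cons, ih]
    by_cases hm : c ∈ rest
    · simp [hm]
    · simp only [hm, if_false, PySem.Dict.get?_insert]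
      by_cases hk : c = k <;> simp [hk, hm]

theorem pvGet?_ofList_const (l : List Int) (c : Int) :
    (PySem.Dict.ofList (l.map (fun k => (k, (none : Option Int))))).get? c
      = if c ∈ l then some none else none := by
  rw [PySem.Dict.ofList, PySem.Dict.update, pvFold_insert_const, PySem.Dict.get?_empty]

theorem pvScan_rel (reflocs : List Int) :
    ∀ (cs : List Char) (s j : Int) (dA : PySem.Dict Int (Option Int)) (dB : PySem.Dict Int Int),
      0 ≤ s →
      (∀ c, c ∈ reflocs → dA.get? c = some (dB.get? c)) →
      (∀ c p, dB.get? c = some p → 0 ≤ p) →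
      dA.keys.Nodup →
      (∀ c, c ∈ reflocs →
        ((PySem.List.enumerate cs s).foldl (pvStepA reflocs) (j, dA)).2.get? c
          = some (((PySem.List.enumerate cs s).foldl pvStepB (j, dB)).2.get? c)) ∧
      (∀ c p, ((PySem.List.enumerate cs s).foldl pvStepB (j, dB)).2.get? c = some p → 0 ≤ p) ∧
      ((PySem.List.enumerate cs s).foldl (pvStepA reflocs) (j, dA)).2.keys.Nodup := by
  intro cs
  induction cs with
  | nil => intro s j dA dB _ h1 h2 h3; exact ⟨h1, h2, h3⟩
  | cons x t ih =>
    intro s j dA dB hs h1 h2 h3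
    rw [PySem.List.enumerate_cons]
    simp only [List.foldl_cons]
    set j' := if x ≠ '-' then j + 1 else j with hj'
    have hA : pvStepA reflocs (j, dA) (s, x)
        = (j', if reflocs.contains j' then dA.insert j' (some (s + 1)) else dA) := rfl
    have hB : pvStepB (j, dB) (s, x) = (j', dB.insert j' (s + 1)) := rfl
    rw [hA, hB]
    apply ih (s + 1) j' _ _ (by omega)
    · intro c hc
      by_cases hcj : c = j'
      · have hcon : reflocs.contains j' = true := by
          rw [List.contains_iff_mem]; rw [hcj] at hc; exact hc
        rw [hcon]
        simp only [if_true]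
        rw [PySem.Dict.get?_insert, PySem.Dict.get?_insert, if_pos hcj, if_pos hcj]
      · by_cases hcon : reflocs.contains j' = true
        · rw [hcon]
          simp only [if_true]
          rw [PySem.Dict.get?_insert, PySem.Dict.get?_insert, if_neg hcj, if_neg hcj]
          exact h1 c hc
        · rw [Bool.not_eq_true] at hcon
          rw [hcon]
          simp only [Bool.false_eq_true, if_false]
          rw [PySem.Dict.get?_insert, if_neg hcj]
          exact h1 c hc
    · intro c p hcp
      rw [PySem.Dict.get?_insert] at hcp
      by_cases hcj : c = j'
      · rw [if_pos hcj] at hcp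
        have : p = s + 1 := by injection hcp; omega
        omega
      · rw [if_neg hcj] at hcp
        exact h2 c p hcp
    · by_cases hcon : reflocs.contains j' = true
      · rw [hcon]
        simp only [if_true]
        exact PySem.Dict.nodup_keys_insert _ _ _ h3
      · rw [Bool.not_eq_true] at hcon
        rw [hcon]
        simpa using h3

theorem pvGet?_transfold_not_mem (qs : List Char) :
    ∀ (l : List (Int × Option Int)) (d : PySem.Dict Int Int) (c : Int), c ∉ l.map Prod.fst →
      (l.foldl (fun d kv => d.insert kv.1 (pvL qs kv.2)) d).get? c = d.get? c := by
  intro l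
  induction l with
  | nil => intro d c _; rfl
  | cons kv rest ih =>
    intro d c hc
    simp only [List.map_cons, List.mem_cons, not_or] at hc
    simp only [List.foldl_cons]
    rw [ih _ c hc.2, PySem.Dict.get?_insert, if_neg hc.1]

theorem pvGet?_transfold (qs : List Char) :
    ∀ (l : List (Int × Option Int)) (d : PySem.Dict Int Int) (c : Int) (v : Option Int),
      (l.map Prod.fst).Nodup → (c, v) ∈ l →
      (l.foldl (fun d kv => d.insert kv.1 (pvL qs kv.2)) d).get? c = some (pvL qs v) := by
  intro l
  induction l with
  | nil => intro d c v _ h; simp at h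
  | cons kv rest ih =>
    intro d c v hnd hm
    simp only [List.map_cons, List.nodup_cons] at hnd
    simp only [List.foldl_cons]
    rcases List.mem_cons.mp hm with heq | hrest
    · have hc : c = kv.1 := by rw [← heq]
      have hv : v = kv.2 := by rw [← heq]
      have hnot : c ∉ rest.map Prod.fst := by rw [hc]; exact fun h => hnd.1 h
      rw [pvGet?_transfold_not_mem qs rest _ c hnot, PySem.Dict.get?_insert, if_pos hc, hv]
    · exact ih _ c v hnd.2 hrest

theorem pvOut_items (g g' : (String × Int × Int) → (Int × Int)) :
    ∀ (l : List (String × Int × Int)) (acc : PySem.Dict String (Int × Int)),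
      (l.map Prod.fst).Nodup →
      (∀ k, k ∈ l.map Prod.fst → acc.contains k = false) →
      (∀ kv, kv ∈ l → PySem.Str.startswith kv.1 "_" = false → g kv = g' kv) →
      (l.foldl (fun acc kv => if PySem.Str.startswith kv.1 "_" then acc else acc.insert kv.1 (g kv)) acc).items
        = acc.items ++ (l.filter (fun kv => !(PySem.Str.startswith kv.1 "_"))).map (fun kv => (kv.1, g' kv)) := by
  intro l
  induction l with
  | nil => intro acc _ _ _; simp
  | cons kv rest ih =>
    intro acc hnd hcon hg
    simp only [List.map_cons, List.nodup_cons] at hnd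
    simp only [List.foldl_cons, List.filter_cons]
    by_cases hu : PySem.Str.startswith kv.1 "_" = true
    · rw [if_pos hu]
      simp only [hu, Bool.not_true, Bool.false_eq_true, if_false]
      exact ih acc hnd.2 (fun k hk => hcon k (by simp [hk])) (fun kv' h' => hg kv' (by simp [h']))
    · rw [Bool.not_eq_true] at hu
      rw [hu]
      simp only [Bool.false_eq_true, if_false, Bool.not_false, if_true]
      rw [ih (acc.insert kv.1 (g kv)) hnd.2
        (fun k hk => by
          rw [PySem.Dict.contains_insert]
          have : k ≠ kv.1 := fun h => hnd.1 (h ▸ hk)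
          simp [this, hcon k (by simp [hk])])
        (fun kv' h' => hg kv' (by simp [h']))]
      rw [PySem.Dict.items_insert_of_not_contains _ _ (hcon kv.1 (by simp))]
      rw [hg kv (by simp) hu]
      simp

theorem pvKey (refa qs : List Char) (reflocs : List Int) (c : Int) (hc : c ∈ reflocs) :
    (((PySem.List.enumerate refa 0).foldl (pvStepA reflocs)
        (0, PySem.Dict.ofList (reflocs.map (fun k => (k, (none : Option Int)))))).2.items.foldl
      (fun (d : PySem.Dict Int Int) kv => d.insert kv.1 (pvL qs kv.2)) PySem.Dict.empty).getD c 0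
    = pvTransB ((PySem.List.enumerate refa 0).foldl pvStepB (0, PySem.Dict.empty)).2
        (qs.foldl pvPrefStep [(0 : Int)]) (PySem.List.pyGetD (qs.foldl pvPrefStep [(0 : Int)]) (-1) 0)
        (qs.length : Int) c := by
  obtain ⟨h1, h2, h3⟩ := pvScan_rel reflocs refa 0 0
      (PySem.Dict.ofList (reflocs.map (fun k => (k, (none : Option Int))))) PySem.Dict.empty
      (le_refl 0)
      (fun c hc => by rw [pvGet?_ofList_const, if_pos hc, PySem.Dict.get?_empty])
      (fun c p hp => by rw [PySem.Dict.get?_empty] at hp; cases hp)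
      (PySem.Dict.nodup_keys_ofList _)
  have hget := h1 c hc
  have hmem := PySem.Dict.mem_items_of_get?_eq_some _ hget
  have hnd : ((((PySem.List.enumerate refa 0).foldl (pvStepA reflocs)
      (0, PySem.Dict.ofList (reflocs.map (fun k => (k, (none : Option Int)))))).2).items.map Prod.fst).Nodup := h3
  rw [PySem.Dict.getD_eq_get?_getD, pvGet?_transfold qs _ _ c _ hnd hmem]
  simp only [Option.getD_some]
  rcases hw : (((PySem.List.enumerate refa 0).foldl pvStepB (0, PySem.Dict.empty)).2).get? c with _ | p
  · rw [pvL_none, pvTransB, hw, pvPref_last]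
  · rw [pvTransB, hw, pvL_some qs p (h2 c p hw)]

-- ===== VERDICT (by name: the statement is the Claim_ definition above) =====
theorem mapCdomcoords_spec : Claim_equal_mapCdomcoords := by
  intro refalgn qalign featlocs _
  unfold Spec_mapCdomcoords mapCdomcoords mapCdomcoords_alt
  set fd := (PySem.Dict.ofList featlocs).items with hfd
  set reflocs : List Int :=
    (fd.filter (fun kv => !(PySem.Str.startswith kv.1 "_"))).map (fun kv => kv.2.1) ++
    (fd.filter (fun kv => !(PySem.Str.startswith kv.1 "_"))).map (fun kv => kv.2.2) with hrl
  set qs := qalign.toList with hqs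
  refine Eq.trans
    (pvOut_items
      (fun kv => ((((PySem.List.enumerate refalgn.toList 0).foldl (pvStepA reflocs)
          (0, PySem.Dict.ofList (reflocs.map (fun k => (k, (none : Option Int)))))).2.items.foldl
            (fun (d : PySem.Dict Int Int) kv => d.insert kv.1 (pvL qs kv.2)) PySem.Dict.empty).getD kv.2.1 0,
        (((PySem.List.enumerate refalgn.toList 0).foldl (pvStepA reflocs)
          (0, PySem.Dict.ofList (reflocs.map (fun k => (k, (none : Option Int)))))).2.items.foldl
            (fun (d : PySem.Dict Int Int) kv => d.insert kv.1 (pvL qs kv.2)) PySem.Dict.empty).getD kv.2.2 0))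
      (fun kv => (pvTransB ((PySem.List.enumerate refalgn.toList 0).foldl pvStepB (0, PySem.Dict.empty)).2
          (qs.foldl pvPrefStep [(0 : Int)]) (PySem.List.pyGetD (qs.foldl pvPrefStep [(0 : Int)]) (-1) 0)
          (qs.length : Int) kv.2.1,
        pvTransB ((PySem.List.enumerate refalgn.toList 0).foldl pvStepB (0, PySem.Dict.empty)).2
          (qs.foldl pvPrefStep [(0 : Int)]) (PySem.List.pyGetD (qs.foldl pvPrefStep [(0 : Int)]) (-1) 0)
          (qs.length : Int) kv.2.2))
      fd PySem.Dict.empty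
      (PySem.Dict.nodup_keys_ofList featlocs)
      (fun k _ => PySem.Dict.contains_empty k)
      ?_)
    rfl
  intro kv hkv hu
  have hflt : kv ∈ fd.filter (fun kv => !(PySem.Str.startswith kv.1 "_")) :=
    List.mem_filter.mpr ⟨hkv, by rw [hu]; rfl⟩
  have h1 : kv.2.1 ∈ reflocs := by
    rw [hrl]
    exact List.mem_append_left _ (List.mem_map_of_mem hflt)
  have h2 : kv.2.2 ∈ reflocs := by
    rw [hrl]
    exact List.mem_append_right _ (List.mem_map_of_mem hflt)
  exact Prod.ext (pvKey refalgn.toList qs reflocs kv.2.1 h1) (pvKey refalgn.toList qs reflocs kv.2.2 h2)
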